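-- pv_equiv track=rewrite | github.com/MrBrantCode/unitest_baseline | mut_generate/mist_train_taco/taco_574/solution.py | calculate_max_score
-- ===== SOURCE A (Python) =====
-- from itertools import combinations_with_replacement
-- from bisect import bisect_right
--
-- def calculate_max_score(N, M, scores):
--     def find_le(a, x):
--         i = bisect_right(a, x)
--         if i:
--             return a[i - 1]
--         raise ValueError
--
--     scores.append(0)
--     scores.sort()
--
--     combi = combinations_with_replacement(scores, 2)
--     i_scores = [sum(x) for x in combi if sum(x) < M]
--     i_scores.sort()
--
--     results = [x + find_le(i_scores, M - x) for x in i_scores]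
--     return max(results)
-- ===== SOURCE B (Python) =====
-- def calculate_max_score(N, M, scores):
--     scores.append(0)
--     scores.sort()
--     sums = []
--     for idx in range(len(scores)):
--         for j in range(idx, len(scores)):
--             sums.append(scores[idx] + scores[j])
--     i_scores = sorted(v for v in sums if v < M)
--     k = len(i_scores)
--     j = k - 1
--     best = None
--     for i in range(k):
--         x = i_scores[i]
--         while j > 0 and x + i_scores[j] > M:
--             j -= 1
--         v = x + i_scores[j]
--         if best is None or v > best:
--             best = v
--     return best
-- ===== Notes on version B (the rewrite author's own statement) =====
-- stated objective: alternative
-- what changed: B keeps A's preprocessing (append 0, sort, sorted pair-sums below M) but replaces A's per-element bisect_right binary search with a single two-pointer sweep over the sorted pair-sum list, tracking the running maximum.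
import Mathlib
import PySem

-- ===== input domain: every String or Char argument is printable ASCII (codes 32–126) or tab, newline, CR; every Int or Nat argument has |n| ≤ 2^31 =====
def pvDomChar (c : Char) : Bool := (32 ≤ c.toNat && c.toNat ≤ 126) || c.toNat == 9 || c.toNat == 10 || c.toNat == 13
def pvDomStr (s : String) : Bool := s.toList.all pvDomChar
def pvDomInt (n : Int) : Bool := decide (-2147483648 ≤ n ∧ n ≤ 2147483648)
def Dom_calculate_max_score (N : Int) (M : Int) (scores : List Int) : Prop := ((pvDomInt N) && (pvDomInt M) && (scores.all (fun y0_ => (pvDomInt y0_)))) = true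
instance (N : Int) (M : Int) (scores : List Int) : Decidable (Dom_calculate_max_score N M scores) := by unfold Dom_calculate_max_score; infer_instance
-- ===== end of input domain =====

-- B replaces A's per-element bisect_right search with a single two-pointer sweep over the
-- sorted pair-sum list (a different algorithm of similar overall cost). Both A and B mutate the
-- `scores` argument in place (append 0, sort); the equivalence proved here is about the return value.

-- ===== PORT A =====
-- itertools.combinations_with_replacement(xs, 2), in CPython's order
def pvCwr2 : List Int → List (Int × Int)
  | [] => []
  | a :: rest => (a :: rest).map (fun b => (a, b)) ++ pvCwr2 rest

-- A's find_le; the ValueError branch (bisect index 0) returns the junk value 0 there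
def pvFindLe (a : List Int) (x : Int) : Int :=
  let i := PySem.List.bisectRight a x
  if i ≠ 0 then a.getD (i - 1) 0 else 0

def calculate_max_score (N : Int) (M : Int) (scores : List Int) : Int :=
  let scores1 := scores ++ [0]
  let scores2 := PySem.List.sorted scores1 (fun x => x)
  let combi := pvCwr2 scores2
  let i_scores0 := (combi.map (fun p => p.1 + p.2)).filter (fun s => decide (s < M))
  let i_scores := PySem.List.sorted i_scores0 (fun x => x)
  let results := i_scores.map (fun x => x + pvFindLe i_scores (M - x))
  -- max([]) raises ValueError in Python: excluded by Pre_, junk value 0 here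
  (PySem.List.max? results (fun y => y)).getD 0

-- ===== PORT B =====
-- Source B's outer while-loop over the shrinking tail; the inner for-append is a foldl
def pvSumsLoop : List Int → List Int → List Int
  | acc, [] => acc
  | acc, a :: rest => pvSumsLoop ((a :: rest).foldl (fun ac b => ac ++ [a + b]) acc) rest

-- Source B's inner while loop: `while j > 0 and x + i_scores[j] > M: j -= 1`
def pvDropJ (L : List Int) (M x : Int) : Nat → Nat
  | 0 => 0
  | j + 1 => if x + L.getD (j + 1) 0 > M then pvDropJ L M x j else j + 1

-- Source B's for-loop over range(k), state = (j, best)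
def pvLoop (L : List Int) (M : Int) : List Nat → Nat × Option Int → Nat × Option Int
  | [], st => st
  | i :: rest, (j, best) =>
      let x := L.getD i 0
      let j' := pvDropJ L M x j
      let v := x + L.getD j' 0
      let best' := match best with
        | none => some v
        | some b => if v > b then some v else some b
      pvLoop L M rest (j', best')

def calculate_max_score_alt (N : Int) (M : Int) (scores : List Int) : Int :=
  let s := PySem.List.sorted (scores ++ [0]) (fun x => x)
  let sums := pvSumsLoop [] s
  let i_scores := PySem.List.sorted (sums.filter (fun v => decide (v < M))) (fun x => x)
  let k := i_scores.length
  -- Python's `best` is None when k = 0 (outside Pre_); junk value 0 here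
  ((pvLoop i_scores M (List.range k) (k - 1, none)).2).getD 0

-- ===== PRECONDITION & SPEC =====
-- Pre_ excludes exactly the inputs where no pair sum (0 included) is below M: there Python A's
-- `max([])` raises ValueError (A returns no value; B returns None, not an int).
def Pre_calculate_max_score (N : Int) (M : Int) (scores : List Int) : Prop :=
  0 < M ∨ ∃ s ∈ scores, 2 * s < M
instance (N : Int) (M : Int) (scores : List Int) : Decidable (Pre_calculate_max_score N M scores) := by unfold Pre_calculate_max_score; infer_instance

def pvWitness_calculate_max_score : Int × Int × List Int := (4, 10, [1, 2, 3])

def Spec_calculate_max_score (N : Int) (M : Int) (scores : List Int) (out : Int) : Prop := out = calculate_max_score_alt N M scores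
instance (N : Int) (M : Int) (scores : List Int) (out : Int) : Decidable (Spec_calculate_max_score N M scores out) := by unfold Spec_calculate_max_score; infer_instance

-- ===== CLAIM (what is proved, stated in full; the proofs are below) =====
def Claim_equal_calculate_max_score : Prop := ∀ (N : Int) (M : Int) (scores : List Int), Dom_calculate_max_score N M scores → Pre_calculate_max_score N M scores → Spec_calculate_max_score N M scores (calculate_max_score N M scores)

-- ===== LEMMAS AND PROOFS =====

-- B's sum generation produces exactly the sums of A's combinations_with_replacement pairs.
theorem pvSumsLoop_eq (t acc : List Int) :
    pvSumsLoop acc t = acc ++ (pvCwr2 t).map (fun p => p.1 + p.2) := by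
  induction t generalizing acc with
  | nil => simp [pvSumsLoop, pvCwr2]
  | cons a rest ih =>
      rw [pvSumsLoop, PySem.List.foldl_append_singleton_eq_map, ih]
      simp [pvCwr2, List.map_map, Function.comp]

-- every element pairs with itself
theorem pvCwr2_self_mem {a : Int} {t : List Int} (h : a ∈ t) :
    (a, a) ∈ pvCwr2 t := by
  induction t with
  | nil => simp at h
  | cons b rest ih =>
      rcases List.mem_cons.mp h with rfl | h
      · simp [pvCwr2]
      · simp [pvCwr2, ih h]

-- head of a sorted (id-key) list is a lower bound for its getD-members
theorem sorted_head_le {L : List Int} (hp : L.Pairwise (· ≤ ·)) {x : Int} (hx : x ∈ L) :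
    L.getD 0 0 ≤ x := by
  cases L with
  | nil => simp at hx
  | cons h t =>
      rcases List.mem_cons.mp hx with rfl | hx
      · simp
      · simpa using (List.pairwise_cons.mp hp).1 x hx

-- specification of the inner while loop
theorem pvDropJ_spec (L : List Int) (M x : Int)
    (hx : x + L.getD 0 0 ≤ M) :
    ∀ j : Nat, j < L.length →
      (∀ m, j < m → m < L.length → M - x < L.getD m 0) →
      pvDropJ L M x j ≤ j ∧ x + L.getD (pvDropJ L M x j) 0 ≤ M ∧
        ∀ m, pvDropJ L M x j < m → m < L.length → M - x < L.getD m 0 := by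
  intro j
  induction j with
  | zero => intro hj hup; simpa [pvDropJ] using ⟨hx, hup⟩
  | succ j ih =>
      intro hj hup
      by_cases hc : x + L.getD (j + 1) 0 > M
      · have hup' : ∀ m, j < m → m < L.length → M - x < L.getD m 0 := by
          intro m hm hml
          by_cases hmj : m = j + 1
          · subst hmj; omega
          · exact hup m (by omega) hml
        have := ih (by omega) hup'
        simp only [pvDropJ, if_pos hc]
        exact ⟨by omega, this.2.1, this.2.2⟩
      · simp only [pvDropJ, if_neg hc]
        exact ⟨le_refl _, by omega, hup⟩

-- find_le returns the element the while loop stops at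
theorem pvFindLe_eq (L : List Int) (t : Int) (hp : L.Pairwise (· ≤ ·))
    (j' : Nat) (hj' : j' < L.length)
    (hle : L.getD j' 0 ≤ t) (hup : ∀ m, j' < m → m < L.length → t < L.getD m 0) :
    pvFindLe L t = L.getD j' 0 := by
  obtain ⟨hlen, hlow, hhigh⟩ := PySem.List.bisectRight_spec L t hp
  have hb : PySem.List.bisectRight L t = j' + 1 := by
    by_contra hne
    rcases Nat.lt_or_ge (PySem.List.bisectRight L t) (j' + 1) with h | h
    · have := hhigh j' hj' (by omega)
      rw [List.getD_eq_getElem L 0 hj'] at hle; omega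
    · have h2 : j' + 1 < L.length := by omega
      have := hlow (j' + 1) h2 (by omega)
      have := hup (j' + 1) (by omega) h2
      rw [List.getD_eq_getElem L 0 h2] at this; omega
  simp [pvFindLe, hb]

-- the value fold that pvLoop's best-accumulator performs, over the list of chosen values
def pvFoldBest : Option Int → List Int → Option Int
  | best, [] => best
  | best, v :: rest =>
      pvFoldBest (match best with
        | none => some v
        | some b => if v > b then some v else some b) rest

-- main loop invariant: the two-pointer loop computes the same values as A's find_le map
theorem pvLoop_spec (L : List Int) (M : Int) (hp : L.Pairwise (· ≤ ·))
    (H : ∀ x ∈ L, x + L.getD 0 0 ≤ M) :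
    ∀ (n i j : Nat) (best : Option Int), i + n = L.length → j < L.length →
      (∀ m, j < m → m < L.length → ∀ _ : i < L.length, M - L.getD i 0 < L.getD m 0) →
      (pvLoop L M (List.range' i n) (j, best)).2 =
        pvFoldBest best ((List.range' i n).map (fun q => L.getD q 0 + pvFindLe L (M - L.getD q 0))) := by
  intro n
  induction n with
  | zero => intro i j best _ _ _; simp [pvLoop, pvFoldBest]
  | succ n ih =>
      intro i j best hin hj hinv
      have hi : i < L.length := by omega
      have hxmem : L.getD i 0 ∈ L := by
        rw [List.getD_eq_getElem L 0 hi]; exact List.getElem_mem hi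
      have hx : L.getD i 0 + L.getD 0 0 ≤ M := H _ hxmem
      obtain ⟨hj'le, hj'val, hj'up⟩ :=
        pvDropJ_spec L M (L.getD i 0) hx j hj (fun m hm hml => hinv m hm hml hi)
      set x := L.getD i 0 with hxdef
      set j' := pvDropJ L M x j with hj'def
      have hfle : pvFindLe L (M - x) = L.getD j' 0 :=
        pvFindLe_eq L (M - x) hp j' (by omega) (by omega) (by intro m h1 h2; have := hj'up m h1 h2; omega)
      rw [List.range'_succ]
      simp only [pvLoop, List.map_cons, pvFoldBest]
      rw [ih (i + 1) j' _ (by omega) (by omega) ?_, hfle]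
      intro m hm hml hi1
      have hmono : L.getD i 0 ≤ L.getD (i + 1) 0 := by
        rw [List.getD_eq_getElem L 0 hi, List.getD_eq_getElem L 0 hi1]
        exact List.pairwise_iff_getElem.mp hp i (i + 1) hi hi1 (by omega)
      have := hj'up m hm hml
      omega

-- pvFoldBest from `some` is the running max
theorem pvFoldBest_some (l : List Int) : ∀ b : Int,
    pvFoldBest (some b) l = some (l.foldl max b) := by
  induction l with
  | nil => intro b; simp [pvFoldBest]
  | cons v rest ih =>
      intro b
      have : (if v > b then some v else some b) = some (max b v) := by
        split_ifs with h
        · rw [max_eq_right (le_of_lt h)]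
        · rw [max_eq_left (by omega)]
      simp only [pvFoldBest, this, ih, List.foldl_cons]

-- pvFoldBest from none is Python's max() over the list
theorem pvFoldBest_none (l : List Int) :
    pvFoldBest none l = PySem.List.max? l (fun y => y) := by
  cases l with
  | nil =>
      rw [(PySem.List.max?_eq_none_iff ([] : List Int) (fun y => y)).mpr rfl]
      rfl
  | cons v rest =>
      simp only [pvFoldBest, pvFoldBest_some, PySem.List.max?_id_cons]

-- mapping over range-indices is mapping over the list
theorem map_getD_range (L : List Int) (F : Int → Int) :
    (List.range L.length).map (fun q => F (L.getD q 0)) = L.map F := by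
  apply List.ext_getElem
  · simp
  · intro i h1 h2
    simp only [List.getElem_map, List.getElem_range]
    rw [List.getD_eq_getElem L 0 (by simpa using h2)]

-- 2*a is among the generated sums
theorem two_mem_sums {a : Int} {t : List Int} (h : a ∈ t) :
    a + a ∈ (pvCwr2 t).map (fun p => p.1 + p.2) := by
  exact List.mem_map.mpr ⟨(a, a), pvCwr2_self_mem h, rfl⟩

-- ===== VERDICT (by name: the statement is the Claim_ definition above) =====
theorem calculate_max_score_spec : Claim_equal_calculate_max_score := by
  intro N M scores _ _
  unfold Spec_calculate_max_score calculate_max_score calculate_max_score_alt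
  simp only [pvSumsLoop_eq, List.nil_append]
  set s := PySem.List.sorted (scores ++ [0]) (fun x => x) with hs
  set L := PySem.List.sorted
      (((pvCwr2 s).map (fun p => p.1 + p.2)).filter (fun v => decide (v < M))) (fun x => x) with hL
  have hp : L.Pairwise (· ≤ ·) := PySem.List.sorted_pairwise _ _
  -- every element of L is a pair sum < M
  have hmemM : ∀ x ∈ L, x < M := by
    intro x hx
    rw [hL, PySem.List.mem_sorted] at hx
    simpa using (List.mem_filter.mp hx).2
  -- H : x + L[0] ≤ M for every member x
  have H : ∀ x ∈ L, x + L.getD 0 0 ≤ M := by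
    intro x hx
    by_cases hM : 0 < M
    · -- 0 ∈ L, so the head is ≤ 0
      have h0s : (0 : Int) ∈ s := by rw [hs, PySem.List.mem_sorted]; simp
      have h0L : (0 : Int) ∈ L := by
        rw [hL, PySem.List.mem_sorted, List.mem_filter]
        refine ⟨by simpa using two_mem_sums h0s, by simpa using hM⟩
      have := sorted_head_le hp h0L
      have := hmemM x hx
      omega
    · -- ¬ 0 < M: head ≤ x and x < M give x + head ≤ 2x ≤ M
      have h1 := sorted_head_le hp hx
      have h2 := hmemM x hx
      omega
  have hmain := pvLoop_spec L M hp H L.length 0 (L.length - 1) none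
  rcases Nat.eq_zero_or_pos L.length with hk | hk
  · -- L empty: both sides are the junk value 0
    have hnil : L = [] := List.length_eq_zero_iff.mp hk
    rw [hnil]
    simp [pvLoop, (PySem.List.max?_eq_none_iff ([] : List Int) (fun y => y)).mpr rfl]
  · rw [List.range_eq_range']
    rw [hmain (by omega) (by omega) (by intro m h1 h2 _; omega)]
    rw [show List.range' 0 L.length = List.range L.length from (List.range_eq_range').symm]
    rw [map_getD_range L (fun x => x + pvFindLe L (M - x)), pvFoldBest_none]
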